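-- pv_equiv track=rewrite | github.com/Mikecraft1224/EiP-WiSe2024 | Blatt 05/HeavyMetalUmlaute_2.py | translateToHeavyMetalSplitted
-- ===== SOURCE A (Python) =====
-- def translateToHeavyMetalSplitted(s: str):
--     counters = [0, 0, 0]
--     translated = False
--
--     out = ""
--
--     translation = {
--         "a": "ä",
--         "o": "ö",
--         "u": "ü",
--     }
--
--     # [("a", "ä"), ("o", "ö"), ("u", "ü")]
--
--     for c in s:
--         # if there has been a space and the current character is in the translation
--         if not translated and c.lower() in translation:
--             # fancy way of counting the characters
--             counters[list(translation.keys()).index(c.lower())] += 1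
--             # otherwise we would have to do this:
--             # if c.lower() == "a":
--             #     counters[0] += 1
--             # elif c.lower() == "o":
--             #     counters[1] += 1
--             # elif c.lower() == "u":
--             #     counters[2] += 1
--
--             # if there has been two characters of one type in this word
--             # we can skip checking which character because if one character was translated
--             # this wouldn't be executed because translated is True
--             # because of this the current character would be the one that hit the 2
--             if 2 in counters:
--                 # add the tranlated character to the output in the correct case
--                 out += translation[c.lower()] if c.islower() \
--                     else translation[c.lower()].upper()
--                 translated = True
--             else:
--                 out += c
--         else:
--             # reset the counter if there is a space
--             if c == " ":
--                 translated = False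
--                 counters = [0, 0, 0]
--
--             out += c
--
--     return out
-- ===== SOURCE B (Python) =====
-- UMLAUT = {'a': 'ä', 'o': 'ö', 'u': 'ü'}
--
--
-- def _trWord(word):
--     # translate the first character whose (lowercased) vowel a/o/u occurs
--     # for the second time in this word; later characters stay untouched
--     ca = co = cu = 0
--     for i, ch in enumerate(word):
--         low = ch.lower()
--         if low == 'a' or low == 'o' or low == 'u':
--             n = (ca if low == 'a' else co if low == 'o' else cu) + 1
--             if n == 2:
--                 uml = UMLAUT[low]
--                 if not ch.islower():
--                     uml = uml.upper()
--                 return word[:i] + uml + word[i + 1:]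
--             if low == 'a':
--                 ca = n
--             elif low == 'o':
--                 co = n
--             else:
--                 cu = n
--     return word
--
--
-- def translateToHeavyMetalSplitted(s: str):
--     return " ".join(_trWord(w) for w in s.split(" "))
-- ===== Notes on version B (the rewrite author's own statement) =====
-- stated objective: alternative
-- what changed: A makes one flat pass over the whole string with a translated-flag and a counter list that is reset at every space, counting via list(dict.keys()).index and a membership test on the counter list at each vowel; B splits the input on the single-space separator, rewrites each word independently with an early-returning scan over three named vowel counters, and rejoins the words.
import Mathlib
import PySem

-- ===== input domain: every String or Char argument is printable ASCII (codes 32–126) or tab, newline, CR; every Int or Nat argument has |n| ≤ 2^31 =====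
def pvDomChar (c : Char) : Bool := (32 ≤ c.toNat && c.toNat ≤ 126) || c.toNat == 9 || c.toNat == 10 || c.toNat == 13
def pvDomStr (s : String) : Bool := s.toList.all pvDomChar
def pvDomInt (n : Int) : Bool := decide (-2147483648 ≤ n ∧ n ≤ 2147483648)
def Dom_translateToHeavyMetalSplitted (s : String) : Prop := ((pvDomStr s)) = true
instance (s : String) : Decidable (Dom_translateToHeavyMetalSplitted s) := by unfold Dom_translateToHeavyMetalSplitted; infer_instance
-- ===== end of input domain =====

-- B rewrites each space-separated word independently (split/join, three named counters)
-- instead of A's flat reset-flag pass with its per-character dict/keys-index bookkeeping;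
-- same return value, no speed claim.

-- shared helper: Python str.upper() on the three umlaut letters — hand port, exact here
-- (these letters are outside PySem's ASCII upper)
def umlautUpper (c : Char) : Char :=
  if c = 'ä' then 'Ä' else if c = 'ö' then 'Ö' else if c = 'ü' then 'Ü' else c

-- ===== PORT A =====
-- the literal `translation` dict of Source A (chars, since the loop iterates characters)
def pyTranslation : PySem.Dict Char Char :=
  PySem.Dict.ofList [('a', 'ä'), ('o', 'ö'), ('u', 'ü')]

-- one iteration of Source A's for-loop; state = (counters, translated, out);
-- Python's `out += …` string building is modeled on List Char
def stepA (st : List Int × Bool × List Char) (c : Char) : List Int × Bool × List Char :=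
  if !st.2.1 && pyTranslation.contains (PySem.Chars.lowerChar c) then
    -- counters[list(translation.keys()).index(c.lower())] += 1  (index present: guarded)
    let idx : Int := ((PySem.List.index? pyTranslation.keys (PySem.Chars.lowerChar c)).getD 0 : Nat)
    let counters := PySem.List.pySetD st.1 idx (PySem.List.pyGetD st.1 idx 0 + 1)
    if counters.contains 2 then
      (counters, true,
        st.2.2 ++ [if PySem.Chars.islower c then pyTranslation.getD (PySem.Chars.lowerChar c) c
                   else umlautUpper (pyTranslation.getD (PySem.Chars.lowerChar c) c)])
    else (counters, false, st.2.2 ++ [c])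
  else
    if c = ' ' then ([0, 0, 0], false, st.2.2 ++ [c])
    else (st.1, st.2.1, st.2.2 ++ [c])

def translateToHeavyMetalSplitted (s : String) : String :=
  String.ofList (s.toList.foldl stepA ([0, 0, 0], false, [])).2.2

-- ===== PORT B =====
-- the UMLAUT[low] lookup of Source B (low is always one of 'a','o','u')
def umlautOf (low : Char) : Char :=
  if low = 'a' then 'ä' else if low = 'o' then 'ö' else 'ü'

-- Source B's _trWord loop: acc is the already-scanned prefix word[:i], rest is word[i:]
def wtGo (acc rest : List Char) (ca co cu : Int) : List Char :=
  match rest with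
  | [] => acc
  | ch :: rest' =>
    let low := PySem.Chars.lowerChar ch
    if low = 'a' ∨ low = 'o' ∨ low = 'u' then
      let n := (if low = 'a' then ca else if low = 'o' then co else cu) + 1
      if n = 2 then
        acc ++ (if PySem.Chars.islower ch then umlautOf low else umlautUpper (umlautOf low)) :: rest'
      else
        if low = 'a' then wtGo (acc ++ [ch]) rest' n co cu
        else if low = 'o' then wtGo (acc ++ [ch]) rest' ca n cu
        else wtGo (acc ++ [ch]) rest' ca co n
    else wtGo (acc ++ [ch]) rest' ca co cu

def translateToHeavyMetalSplitted_alt (s : String) : String :=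
  String.ofList (PySem.Chars.join [' '] ((PySem.Chars.splitOn s.toList [' ']).map (fun w => wtGo [] w 0 0 0)))

-- ===== PRECONDITION & SPEC =====
def Spec_translateToHeavyMetalSplitted (s : String) (out : String) : Prop := out = translateToHeavyMetalSplitted_alt s
instance (s : String) (out : String) : Decidable (Spec_translateToHeavyMetalSplitted s out) := by unfold Spec_translateToHeavyMetalSplitted; infer_instance

-- ===== CLAIM (what is proved, stated in full; the proofs are below) =====
def Claim_equal_translateToHeavyMetalSplitted : Prop := ∀ (s : String), Dom_translateToHeavyMetalSplitted s → Spec_translateToHeavyMetalSplitted s (translateToHeavyMetalSplitted s)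

-- ===== LEMMAS AND PROOFS =====

-- Python's str.split(" ") as a structural recursion (proved equal to PySem.Chars.splitOn below)
def mySplit : List Char → List (List Char)
  | [] => [[]]
  | c :: r =>
    if c = ' ' then [] :: mySplit r
    else match mySplit r with
      | [] => [[c]]
      | w :: ws => (c :: w) :: ws

lemma mySplit_shape (l : List Char) : ∃ w ws, mySplit l = w :: ws := by
  induction l with
  | nil => exact ⟨[], [], rfl⟩
  | cons c r ih =>
    obtain ⟨w, ws, h⟩ := ih
    by_cases hc : c = ' '
    · exact ⟨[], mySplit r, by simp [mySplit, hc]⟩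
    · exact ⟨c :: w, ws, by simp [mySplit, hc, h]⟩

lemma go_char : ∀ (fuel : Nat) (l cur : List Char) (acc : List (List Char)), l.length < fuel →
    PySem.Chars.splitOn.go [' '] fuel l cur acc =
      acc.reverse ++ (match mySplit l with
        | [] => []
        | w :: ws => (cur.reverse ++ w) :: ws) := by
  intro fuel
  induction fuel with
  | zero => intro l cur acc h; omega
  | succ fuel ih =>
    intro l cur acc h
    cases l with
    | nil => simp [PySem.Chars.splitOn.go, mySplit]
    | cons c rest =>
      obtain ⟨w, ws, hm⟩ := mySplit_shape rest
      by_cases hc : c = ' '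
      · subst hc
        rw [PySem.Chars.splitOn.go]
        simp only [List.isPrefixOf, BEq.rfl, List.isPrefixOf_nil_left, Bool.and_true, if_pos rfl]
        rw [ih _ _ _ (by simpa using Nat.lt_of_succ_lt_succ h)]
        simp [mySplit, hm]
      · rw [PySem.Chars.splitOn.go]
        have hpre : [' '].isPrefixOf (c :: rest) = false := by
          simp [List.isPrefixOf]
          exact fun hx => (hc hx.symm).elim
        simp only [hpre, Bool.false_eq_true, if_neg, ite_false]
        rw [ih _ _ _ (by simpa using Nat.lt_of_succ_lt_succ h)]
        simp [mySplit, hc, hm]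

lemma splitOn_eq (l : List Char) : PySem.Chars.splitOn l [' '] = mySplit l := by
  obtain ⟨w, ws, hm⟩ := mySplit_shape l
  unfold PySem.Chars.splitOn
  rw [go_char _ _ _ _ (Nat.lt_succ_self _)]
  simp [hm]

-- " ".join on nonempty parts
lemma join_cons : ∀ (ws : List (List Char)) (w : List Char),
    PySem.Chars.join [' '] (w :: ws) = w ++ ws.flatMap (fun v => ' ' :: v) := by
  intro ws
  induction ws with
  | nil => intro w; simp [PySem.Chars.join, List.intercalate]
  | cons v vs ih =>
    intro w
    have h2 : [' '].intercalate (w :: v :: vs) = w ++ ' ' :: [' '].intercalate (v :: vs) := by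
      simp [List.intercalate, List.intersperse]
    simp only [PySem.Chars.join] at *
    rw [h2, ih v]
    simp

-- wtGo with the prefix accumulator peeled off (the cons-structured word scan)
def wtSimple : List Char → Int → Int → Int → List Char
  | [], _, _, _ => []
  | ch :: rest, ca, co, cu =>
    let low := PySem.Chars.lowerChar ch
    if low = 'a' ∨ low = 'o' ∨ low = 'u' then
      let n := (if low = 'a' then ca else if low = 'o' then co else cu) + 1
      if n = 2 then
        (if PySem.Chars.islower ch then umlautOf low else umlautUpper (umlautOf low)) :: rest
      else
        if low = 'a' then ch :: wtSimple rest n co cu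
        else if low = 'o' then ch :: wtSimple rest ca n cu
        else ch :: wtSimple rest ca co n
    else ch :: wtSimple rest ca co cu

lemma wtGo_eq : ∀ (rest acc : List Char) (ca co cu : Int),
    wtGo acc rest ca co cu = acc ++ wtSimple rest ca co cu := by
  intro rest
  induction rest with
  | nil => intro acc ca co cu; simp [wtGo, wtSimple]
  | cons ch r ih =>
    intro acc ca co cu
    rw [wtGo, wtSimple]
    split_ifs <;> simp [ih] <;> split <;> simp

-- the flat pass A performs, written as a word-structured recursion: Mfun scans until a
-- vowel repeats, passFun copies the rest of the word and resumes fresh after a space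
mutual
def Mfun : Int → Int → Int → List Char → List Char
  | _, _, _, [] => []
  | ca, co, cu, c :: r =>
    if c = ' ' then ' ' :: Mfun 0 0 0 r
    else
      let low := PySem.Chars.lowerChar c
      if low = 'a' ∨ low = 'o' ∨ low = 'u' then
        let n := (if low = 'a' then ca else if low = 'o' then co else cu) + 1
        if n = 2 then
          (if PySem.Chars.islower c then umlautOf low else umlautUpper (umlautOf low)) :: passFun r
        else
          if low = 'a' then c :: Mfun n co cu r
          else if low = 'o' then c :: Mfun ca n cu r
          else c :: Mfun ca co n r
      else c :: Mfun ca co cu r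

def passFun : List Char → List Char
  | [] => []
  | c :: r => if c = ' ' then ' ' :: Mfun 0 0 0 r else c :: passFun r
end

-- stepA evaluation lemmas
lemma stepA_space (cnt : List Int) (t : Bool) (out : List Char) :
    stepA (cnt, t, out) ' ' = ([0, 0, 0], false, out ++ [' ']) := by
  have h : pyTranslation.contains (PySem.Chars.lowerChar ' ') = false := by decide
  simp [stepA, h]

lemma stepA_true (c : Char) (hc : c ≠ ' ') (cnt : List Int) (out : List Char) :
    stepA (cnt, true, out) c = (cnt, true, out ++ [c]) := by
  simp [stepA, hc]

lemma stepA_nonvowel (c : Char) (hc : c ≠ ' ')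
    (hv : ¬(PySem.Chars.lowerChar c = 'a' ∨ PySem.Chars.lowerChar c = 'o' ∨ PySem.Chars.lowerChar c = 'u'))
    (cnt : List Int) (out : List Char) :
    stepA (cnt, false, out) c = (cnt, false, out ++ [c]) := by
  push_neg at hv
  have hk : pyTranslation.keys = ['a', 'o', 'u'] := by decide
  have h : pyTranslation.contains (PySem.Chars.lowerChar c) = false := by
    rw [PySem.Dict.contains_eq_decide_mem_keys, hk]
    simp [hv.1, hv.2.1, hv.2.2]
  simp [stepA, h, hc]

lemma stepA_a (c : Char) (hl : PySem.Chars.lowerChar c = 'a') (ca co cu : Int)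
    (hco : co = 0 ∨ co = 1) (hcu : cu = 0 ∨ cu = 1) (out : List Char) :
    stepA ([ca, co, cu], false, out) c =
      if ca + 1 = 2 then
        ([ca + 1, co, cu], true, out ++ [if PySem.Chars.islower c then 'ä' else 'Ä'])
      else ([ca + 1, co, cu], false, out ++ [c]) := by
  have h1 : pyTranslation.contains 'a' = true := by decide
  have h2 : PySem.List.index? pyTranslation.keys 'a' = some 0 := by decide
  have h3 : pyTranslation.getD 'a' c = 'ä' := by
    rw [PySem.Dict.getD_eq_get?_getD, show pyTranslation.get? 'a' = some 'ä' from by decide]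
    rfl
  simp only [stepA, hl, h1, h2, h3, Bool.not_false, Bool.true_and, if_pos,
    Option.getD_some, Nat.cast_zero]
  have hset : PySem.List.pySetD [ca, co, cu] 0 (PySem.List.pyGetD [ca, co, cu] 0 0 + 1)
      = [ca + 1, co, cu] := by
    have h0 : PySem.List.pyIdx? 3 (0:Int) = some 0 := by decide
    simp [PySem.List.pySetD, PySem.List.pySet?, PySem.List.pyGetD, PySem.List.pyGet?, h0]
  rw [hset]
  have hcont : ([ca + 1, co, cu].contains 2) = decide (ca + 1 = 2) := by
    rcases hco with rfl | rfl <;> rcases hcu with rfl | rfl <;>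
      (by_cases h4 : ca + 1 = (2:Int) <;> simp [h4, eq_comm])
  rw [hcont]
  by_cases h4 : ca + 1 = 2 <;> simp [h4, umlautUpper]

lemma stepA_o (c : Char) (hl : PySem.Chars.lowerChar c = 'o') (ca co cu : Int)
    (hca : ca = 0 ∨ ca = 1) (hcu : cu = 0 ∨ cu = 1) (out : List Char) :
    stepA ([ca, co, cu], false, out) c =
      if co + 1 = 2 then
        ([ca, co + 1, cu], true, out ++ [if PySem.Chars.islower c then 'ö' else 'Ö'])
      else ([ca, co + 1, cu], false, out ++ [c]) := by
  have h1 : pyTranslation.contains 'o' = true := by decide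
  have h2 : PySem.List.index? pyTranslation.keys 'o' = some 1 := by decide
  have h3 : pyTranslation.getD 'o' c = 'ö' := by
    rw [PySem.Dict.getD_eq_get?_getD, show pyTranslation.get? 'o' = some 'ö' from by decide]
    rfl
  simp only [stepA, hl, h1, h2, h3, Bool.not_false, Bool.true_and, if_pos,
    Option.getD_some, Nat.cast_one]
  have hset : PySem.List.pySetD [ca, co, cu] 1 (PySem.List.pyGetD [ca, co, cu] 1 0 + 1)
      = [ca, co + 1, cu] := by
    have h0 : PySem.List.pyIdx? 3 (1:Int) = some 1 := by decide
    simp [PySem.List.pySetD, PySem.List.pySet?, PySem.List.pyGetD, PySem.List.pyGet?, h0]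
  rw [hset]
  have hcont : ([ca, co + 1, cu].contains 2) = decide (co + 1 = 2) := by
    rcases hca with rfl | rfl <;> rcases hcu with rfl | rfl <;>
      (by_cases h4 : co + 1 = (2:Int) <;> simp [h4, eq_comm])
  rw [hcont]
  by_cases h4 : co + 1 = 2 <;> simp [h4, umlautUpper]

lemma stepA_u (c : Char) (hl : PySem.Chars.lowerChar c = 'u') (ca co cu : Int)
    (hca : ca = 0 ∨ ca = 1) (hco : co = 0 ∨ co = 1) (out : List Char) :
    stepA ([ca, co, cu], false, out) c =
      if cu + 1 = 2 then
        ([ca, co, cu + 1], true, out ++ [if PySem.Chars.islower c then 'ü' else 'Ü'])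
      else ([ca, co, cu + 1], false, out ++ [c]) := by
  have h1 : pyTranslation.contains 'u' = true := by decide
  have h2 : PySem.List.index? pyTranslation.keys 'u' = some 2 := by decide
  have h3 : pyTranslation.getD 'u' c = 'ü' := by
    rw [PySem.Dict.getD_eq_get?_getD, show pyTranslation.get? 'u' = some 'ü' from by decide]
    rfl
  simp only [stepA, hl, h1, h2, h3, Bool.not_false, Bool.true_and, if_pos,
    Option.getD_some, Nat.cast_ofNat]
  have hset : PySem.List.pySetD [ca, co, cu] 2 (PySem.List.pyGetD [ca, co, cu] 2 0 + 1)
      = [ca, co, cu + 1] := by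
    have h0 : PySem.List.pyIdx? 3 (2:Int) = some 2 := by decide
    simp [PySem.List.pySetD, PySem.List.pySet?, PySem.List.pyGetD, PySem.List.pyGet?, h0]
  rw [hset]
  have hcont : ([ca, co, cu + 1].contains 2) = decide (cu + 1 = 2) := by
    rcases hca with rfl | rfl <;> rcases hco with rfl | rfl <;>
      (by_cases h4 : cu + 1 = (2:Int) <;> simp [h4, eq_comm])
  rw [hcont]
  by_cases h4 : cu + 1 = 2 <;> simp [h4, umlautUpper]

-- the A fold computes Mfun (fresh state) / passFun (translated state)
lemma foldA_spec : ∀ l : List Char,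
    (∀ (ca co cu : Int) (out : List Char),
      (ca = 0 ∨ ca = 1) → (co = 0 ∨ co = 1) → (cu = 0 ∨ cu = 1) →
      (List.foldl stepA ([ca, co, cu], false, out) l).2.2 = out ++ Mfun ca co cu l)
    ∧ (∀ (cnt : List Int) (out : List Char),
      (List.foldl stepA (cnt, true, out) l).2.2 = out ++ passFun l) := by
  intro l
  induction l with
  | nil => exact ⟨fun _ _ _ _ _ _ _ => by simp [Mfun], fun _ _ => by simp [passFun]⟩
  | cons c r ih =>
    constructor
    · intro ca co cu out hca hco hcu
      by_cases hsp : c = ' '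
      · subst hsp
        rw [List.foldl_cons, stepA_space, ih.1 0 0 0 _ (Or.inl rfl) (Or.inl rfl) (Or.inl rfl)]
        simp [Mfun]
      · by_cases ha : PySem.Chars.lowerChar c = 'a'
        · rw [List.foldl_cons, stepA_a c ha ca co cu hco hcu]
          rcases hca with rfl | rfl
          · rw [if_neg (by norm_num)]
            rw [ih.1 (0 + 1) co cu _ (by norm_num) hco hcu]
            simp [Mfun, hsp, ha]
          · rw [if_pos (by norm_num)]
            rw [ih.2]
            simp [Mfun, hsp, ha, umlautOf, umlautUpper]
        · by_cases ho : PySem.Chars.lowerChar c = 'o'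
          · rw [List.foldl_cons, stepA_o c ho ca co cu hca hcu]
            rcases hco with rfl | rfl
            · rw [if_neg (by norm_num)]
              rw [ih.1 ca (0 + 1) cu _ hca (by norm_num) hcu]
              simp [Mfun, hsp, ha, ho]
            · rw [if_pos (by norm_num)]
              rw [ih.2]
              simp [Mfun, hsp, ha, ho, umlautOf, umlautUpper]
          · by_cases hu : PySem.Chars.lowerChar c = 'u'
            · rw [List.foldl_cons, stepA_u c hu ca co cu hca hco]
              rcases hcu with rfl | rfl
              · rw [if_neg (by norm_num)]
                rw [ih.1 ca co (0 + 1) _ hca hco (by norm_num)]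
                simp [Mfun, hsp, ha, ho, hu]
              · rw [if_pos (by norm_num)]
                rw [ih.2]
                simp [Mfun, hsp, ha, ho, hu, umlautOf, umlautUpper]
            · rw [List.foldl_cons, stepA_nonvowel c hsp (by tauto)]
              rw [ih.1 ca co cu _ hca hco hcu]
              simp [Mfun, hsp, ha, ho, hu]
    · intro cnt out
      by_cases hsp : c = ' '
      · subst hsp
        rw [List.foldl_cons, stepA_space, ih.1 0 0 0 _ (Or.inl rfl) (Or.inl rfl) (Or.inl rfl)]
        simp [passFun]
      · rw [List.foldl_cons, stepA_true c hsp, ih.2]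
        simp [passFun, hsp]

-- Mfun/passFun are the split-then-per-word computation
lemma MS_spec : ∀ l : List Char, ∀ w ws, mySplit l = w :: ws →
    (∀ ca co cu : Int,
      Mfun ca co cu l = wtSimple w ca co cu ++ ws.flatMap (fun v => ' ' :: wtSimple v 0 0 0))
    ∧ passFun l = w ++ ws.flatMap (fun v => ' ' :: wtSimple v 0 0 0) := by
  intro l
  induction l with
  | nil =>
    intro w ws hm
    simp only [mySplit] at hm
    cases hm
    exact ⟨fun _ _ _ => by simp [Mfun, wtSimple], by simp [passFun]⟩
  | cons c r ih =>
    intro w ws hm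
    obtain ⟨w1, ws1, hm1⟩ := mySplit_shape r
    by_cases hsp : c = ' '
    · subst hsp
      simp only [mySplit, if_pos rfl] at hm
      cases hm
      constructor
      · intro ca co cu
        rw [show Mfun ca co cu (' ' :: r) = ' ' :: Mfun 0 0 0 r from by simp [Mfun]]
        rw [(ih w1 ws1 hm1).1 0 0 0]
        simp [wtSimple, hm1]
      · rw [show passFun (' ' :: r) = ' ' :: Mfun 0 0 0 r from by simp [passFun]]
        rw [(ih w1 ws1 hm1).1 0 0 0]
        simp [hm1]
    · rw [show mySplit (c :: r) = (c :: w1) :: ws1 from by simp [mySplit, hsp, hm1]] at hm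
      injection hm with hma hmb
      subst hma; subst hmb
      constructor
      · intro ca co cu
        by_cases hv : PySem.Chars.lowerChar c = 'a' ∨ PySem.Chars.lowerChar c = 'o' ∨ PySem.Chars.lowerChar c = 'u'
        · rw [Mfun, wtSimple]
          simp only [hsp, ite_false, hv, if_pos]
          split_ifs <;> simp [(ih w1 ws1 hm1).1, (ih w1 ws1 hm1).2]
        · rw [Mfun, wtSimple]
          simp only [hsp, ite_false, hv, if_false]
          simp [hv, (ih w1 ws1 hm1).1]
      · rw [show passFun (c :: r) = c :: passFun r from by simp [passFun, hsp]]
        rw [(ih w1 ws1 hm1).2]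
        simp

-- ===== VERDICT (by name: the statement is the Claim_ definition above) =====
theorem translateToHeavyMetalSplitted_spec : Claim_equal_translateToHeavyMetalSplitted := by
  unfold Claim_equal_translateToHeavyMetalSplitted
  intro s _
  unfold Spec_translateToHeavyMetalSplitted translateToHeavyMetalSplitted translateToHeavyMetalSplitted_alt
  refine congrArg String.ofList ?_
  obtain ⟨w, ws, hm⟩ := mySplit_shape s.toList
  rw [(foldA_spec s.toList).1 0 0 0 [] (Or.inl rfl) (Or.inl rfl) (Or.inl rfl)]
  rw [(MS_spec s.toList w ws hm).1 0 0 0]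
  rw [splitOn_eq, hm]
  simp only [List.map_cons, join_cons, wtGo_eq, List.nil_append, List.flatMap_map]
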